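-- pv_equiv track=rewrite | github.com/cannor147/itmo-coding | theory/algebraic/linear/__init__.py | leaders_of_syndromes
-- ===== SOURCE A (Python) =====
-- def leaders_of_syndromes(syndromes):
--     leaders = dict()
--     for e in syndromes.keys():
--         for v in syndromes[e]:
--             if e not in leaders:
--                 leaders[e] = v
--                 continue
--
--             weight = sum([1 if x != 0 else 0 for x in v])
--             leader_weight = sum([1 if x != 0 else 0 for x in leaders[e]])
--             if weight < leader_weight or (weight == leader_weight and str(v) > str(leaders[e])):
--                 leaders[e] = v
--     return leaders
-- ===== SOURCE B (Python) =====
-- def _weight(v):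
--     return sum(1 for x in v if x != 0)
--
--
-- def leaders_of_syndromes(syndromes):
--     leaders = {}
--     for e, vs in syndromes.items():
--         if vs:
--             w = min(map(_weight, vs))
--             leaders[e] = max([v for v in vs if _weight(v) == w], key=str)
--     return leaders
-- ===== Notes on version B (the rewrite author's own statement) =====
-- stated objective: simpler
-- what changed: A's single pass with a running-leader accumulator and combined weight/string comparison is replaced by staged passes per key: first compute the minimum weight over all vectors, then filter the vectors attaining it, then take the string-maximal one of those.
import Mathlib
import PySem

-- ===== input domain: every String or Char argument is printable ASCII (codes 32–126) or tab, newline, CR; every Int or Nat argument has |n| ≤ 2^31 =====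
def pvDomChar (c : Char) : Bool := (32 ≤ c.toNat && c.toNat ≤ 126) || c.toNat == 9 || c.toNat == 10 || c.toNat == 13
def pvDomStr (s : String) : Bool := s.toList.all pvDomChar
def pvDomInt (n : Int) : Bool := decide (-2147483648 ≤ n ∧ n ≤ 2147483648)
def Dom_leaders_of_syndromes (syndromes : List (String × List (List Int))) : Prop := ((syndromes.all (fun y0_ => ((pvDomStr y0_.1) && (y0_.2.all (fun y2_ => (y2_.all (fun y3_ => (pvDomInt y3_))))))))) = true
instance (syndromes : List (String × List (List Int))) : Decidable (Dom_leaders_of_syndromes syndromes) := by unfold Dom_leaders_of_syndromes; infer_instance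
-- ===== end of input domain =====

-- B replaces A's single-pass running-leader loop by staged passes per key (min weight, then
-- filter the min-weight vectors, then max by str); same return value on dict-like inputs
-- (distinct keys).

-- ===== PORT A =====
-- str(v) for a Python list of ints: "[a, b, ...]" (exact for int elements: CPython joins str(x) with ", ")
def pvStr (v : List Int) : String := "[" ++ String.intercalate ", " (v.map PySem.Int.toStr) ++ "]"

-- the body of A's inner `for v in syndromes[e]` loop
def pvInner (e : String) (leaders : PySem.Dict String (List Int)) (v : List Int) : PySem.Dict String (List Int) :=
  if leaders.contains e = false then leaders.insert e v
  else
    let weight := (v.map (fun x => if x ≠ 0 then (1 : Int) else 0)).sum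
    let leader_weight := ((leaders.getD e []).map (fun x => if x ≠ 0 then (1 : Int) else 0)).sum
    if weight < leader_weight ∨ (weight = leader_weight ∧ pvStr (leaders.getD e []) < pvStr v) then
      leaders.insert e v
    else leaders

-- `for e in syndromes.keys(): for v in syndromes[e]:` iterated as the assoc list's pairs;
-- exact for a Python dict, whose keys are distinct (Pre_)
def leaders_of_syndromes (syndromes : List (String × List (List Int))) : List (String × List Int) :=
  (syndromes.foldl (fun leaders p => p.2.foldl (pvInner p.1) leaders)
    (PySem.Dict.empty : PySem.Dict String (List Int))).items

-- ===== PORT B =====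
-- _weight(v) = sum(1 for x in v if x != 0)
def pvWeight (v : List Int) : Int := (v.map (fun x => if x ≠ 0 then (1 : Int) else 0)).sum

-- the body of B's `for e, vs in syndromes.items()` loop: staged passes — min weight,
-- filter the vectors attaining it, max by str.  The `none` arms are unreachable guards
-- (min/max over a non-empty list), kept only for totality.
def pvStepB (leaders : PySem.Dict String (List Int)) (p : String × List (List Int)) : PySem.Dict String (List Int) :=
  if p.2.isEmpty then leaders
  else
    match PySem.List.min? (p.2.map pvWeight) (fun w => w) with
    | none => leaders
    | some w =>
      match PySem.List.max? (p.2.filter (fun v => pvWeight v = w)) (fun v => pvStr v) with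
      | none => leaders
      | some m => leaders.insert p.1 m

def leaders_of_syndromes_alt (syndromes : List (String × List (List Int))) : List (String × List Int) :=
  (syndromes.foldl pvStepB (PySem.Dict.empty : PySem.Dict String (List Int))).items

-- ===== PRECONDITION & SPEC =====
-- Pre_ excludes association lists with duplicate keys: these do not represent a Python dict
-- (Python collapses duplicates before A ever runs), so any behaviour there is an artefact of
-- the list encoding, not of A.
def Pre_leaders_of_syndromes (syndromes : List (String × List (List Int))) : Prop :=
  (syndromes.map Prod.fst).Nodup
instance (syndromes : List (String × List (List Int))) : Decidable (Pre_leaders_of_syndromes syndromes) := by unfold Pre_leaders_of_syndromes; infer_instance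

def pvWitness_leaders_of_syndromes : (List (String × List (List Int))) :=
  [("a", [[0, 1], [1, 1]]), ("b", [])]

def Spec_leaders_of_syndromes (syndromes : List (String × List (List Int))) (out : List (String × List Int)) : Prop := out = leaders_of_syndromes_alt syndromes
instance (syndromes : List (String × List (List Int))) (out : List (String × List Int)) : Decidable (Spec_leaders_of_syndromes syndromes out) := by unfold Spec_leaders_of_syndromes; infer_instance

-- ===== CLAIM (what is proved, stated in full; the proofs are below) =====
def Claim_equal_leaders_of_syndromes : Prop := ∀ (syndromes : List (String × List (List Int))), Dom_leaders_of_syndromes syndromes → Pre_leaders_of_syndromes syndromes → Spec_leaders_of_syndromes syndromes (leaders_of_syndromes syndromes)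

-- ===== LEMMAS AND PROOFS =====

-- one step of A's running leader (replace iff strictly better)
def pvStep (m v : List Int) : List Int :=
  if pvWeight v < pvWeight m ∨ (pvWeight v = pvWeight m ∧ pvStr m < pvStr v) then v else m

-- first-maximal-by-str selection (the operation both `max(.., key=str)` and A's tie branch perform)
def pvSelS (m v : List Int) : List Int := if pvStr m < pvStr v then v else m

-- the canonical per-key result both programs compute
def pvCanon (s : List (String × List (List Int))) : List (String × List Int) :=
  s.filterMap (fun p => match p.2 with
    | [] => none
    | v :: t => some (p.1, t.foldl pvStep v))

lemma foldl_option_step {α : Type} (f : Option α → α → Option α) (g : α → α → α)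
    (hf : ∀ a b, f (some a) b = some (g a b)) (hn : ∀ b, f none b = some b)
    (v : α) (t : List α) :
    List.foldl f none (v :: t) = some (List.foldl g v t) := by
  have aux : ∀ (t : List α) (cur : α), List.foldl f (some cur) t = some (List.foldl g cur t) := by
    intro t
    induction t with
    | nil => intro cur; rfl
    | cons b t ih => intro cur; rw [List.foldl_cons, hf, List.foldl_cons]; exact ih (g cur b)
  rw [List.foldl_cons, hn]; exact aux t v

lemma max?_str_cons (v : List Int) (t : List (List Int)) :
    PySem.List.max? (v :: t) (fun v => pvStr v) = some (t.foldl pvSelS v) := by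
  unfold PySem.List.max?
  apply foldl_option_step _ pvSelS _ (fun b => rfl) v t
  intro a b
  unfold pvSelS
  dsimp only
  split_ifs <;> rfl

lemma foldl_min_le (l : List Int) (i : Int) : l.foldl min i ≤ i := by
  induction l generalizing i with
  | nil => simp
  | cons a l ih => simpa using le_trans (ih (min i a)) (min_le_left _ _)

lemma pvWeight_step_min (v a : List Int) : pvWeight (pvStep v a) = min (pvWeight v) (pvWeight a) := by
  unfold pvStep
  split_ifs with h
  · rcases h with h | ⟨h, _⟩ <;> omega
  · have h' : ¬ pvWeight a < pvWeight v := fun hlt => h (Or.inl hlt)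
    omega

lemma pvStep_eq_selS_of_w_eq (v a : List Int) (h : pvWeight a = pvWeight v) :
    pvStep v a = pvSelS v a := by
  unfold pvStep pvSelS
  split_ifs with h1 h2 h2
  · rfl
  · exact absurd (h1.resolve_left (by omega)).2 h2
  · exact absurd (Or.inr ⟨h, h2⟩) h1
  · rfl

-- the heart of the proof: A's running-leader fold attains the minimum weight, and equals
-- the string-maximum of the min-weight filter of the whole list (B's staged passes)
lemma main_lemma (t : List (List Int)) (v : List Int) :
    pvWeight (t.foldl pvStep v) = (t.map pvWeight).foldl min (pvWeight v) ∧
    PySem.List.max? ((v :: t).filter (fun x => pvWeight x = (t.map pvWeight).foldl min (pvWeight v)))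
        (fun v => pvStr v)
      = some (t.foldl pvStep v) := by
  induction t generalizing v with
  | nil =>
    refine ⟨rfl, ?_⟩
    simp [PySem.List.max?, List.filter]
  | cons a t ih =>
    have hu : pvWeight (pvStep v a) = min (pvWeight v) (pvWeight a) := pvWeight_step_min v a
    have hM : ((a :: t).map pvWeight).foldl min (pvWeight v)
        = (t.map pvWeight).foldl min (pvWeight (pvStep v a)) := by
      simp [hu]
    obtain ⟨ih1, ih2⟩ := ih (pvStep v a)
    refine ⟨by rw [List.foldl_cons, ih1, hM], ?_⟩
    rw [hM, List.foldl_cons]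
    set W := (t.map pvWeight).foldl min (pvWeight (pvStep v a)) with hWdef
    have hWle : W ≤ min (pvWeight v) (pvWeight a) := hu ▸ foldl_min_le _ _
    rcases lt_or_eq_of_le hWle with hlt | heq
    · -- W strictly below both v and a: they (and pvStep v a) are filtered out on both sides
      have hv : ¬ (pvWeight v = W) := by have := min_le_left (pvWeight v) (pvWeight a); omega
      have ha : ¬ (pvWeight a = W) := by have := min_le_right (pvWeight v) (pvWeight a); omega
      have hs : ¬ (pvWeight (pvStep v a) = W) := by omega
      have hfil : (v :: a :: t).filter (fun x => pvWeight x = W)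
          = (pvStep v a :: t).filter (fun x => pvWeight x = W) := by
        simp [List.filter, hv, ha, hs]
      rw [hfil]; exact ih2
    · rcases lt_trichotomy (pvWeight a) (pvWeight v) with hav | hav | hav
      · -- a strictly lighter: pvStep v a = a, v filtered out
        have hstep : pvStep v a = a := by unfold pvStep; rw [if_pos (Or.inl hav)]
        have hv : ¬ (pvWeight v = W) := by
          rw [min_eq_right (le_of_lt hav)] at heq; omega
        have hfil : (v :: a :: t).filter (fun x => pvWeight x = W)
            = (pvStep v a :: t).filter (fun x => pvWeight x = W) := by
          rw [hstep]; simp [List.filter, hv]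
        rw [hfil]; exact ih2
      · -- equal weights: both v and a survive the filter; absorb them with pvSelS
        have hstep : pvStep v a = pvSelS v a := pvStep_eq_selS_of_w_eq v a hav
        have hv : pvWeight v = W := by rw [hav, min_self] at heq; omega
        have ha : pvWeight a = W := by omega
        have hs : pvWeight (pvStep v a) = W := by omega
        have hfilL : (v :: a :: t).filter (fun x => pvWeight x = W)
            = v :: a :: t.filter (fun x => pvWeight x = W) := by
          simp [List.filter, hv, ha]
        have hfilR : (pvStep v a :: t).filter (fun x => pvWeight x = W)
            = pvStep v a :: t.filter (fun x => pvWeight x = W) := by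
          simp [List.filter, hs]
        rw [hfilL]
        rw [hfilR] at ih2
        rw [max?_str_cons] at ih2 ⊢
        rw [List.foldl_cons, ← hstep]
        exact ih2
      · -- v strictly lighter: pvStep v a = v, a filtered out
        have hstep : pvStep v a = v := by
          unfold pvStep; rw [if_neg]; rintro (h | ⟨h, _⟩) <;> omega
        have ha : ¬ (pvWeight a = W) := by
          rw [min_eq_left (le_of_lt hav)] at heq; omega
        have hv : pvWeight v = W := by rw [min_eq_left (le_of_lt hav)] at heq; omega
        have hfil : (v :: a :: t).filter (fun x => pvWeight x = W)
            = (pvStep v a :: t).filter (fun x => pvWeight x = W) := by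
          rw [hstep]; simp [List.filter, ha]
        rw [hfil]; exact ih2

-- B's loop body on a non-empty vector list computes A's running-leader result
lemma pvStepB_cons (d : PySem.Dict String (List Int)) (e : String) (v : List Int) (t : List (List Int)) :
    pvStepB d (e, v :: t) = d.insert e (t.foldl pvStep v) := by
  unfold pvStepB
  rw [if_neg (by simp)]
  have hmin : PySem.List.min? ((v :: t).map pvWeight) (fun w => w)
      = some ((t.map pvWeight).foldl min (pvWeight v)) := by
    rw [List.map_cons, PySem.List.min?_id_cons]
  rw [List.map_cons] at hmin ⊢
  rw [hmin]
  dsimp only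
  rw [(main_lemma t v).2]

-- A-side: one pvInner step on a key already holding `cur` performs pvStep
lemma pvInner_insert (e : String) (d : PySem.Dict String (List Int)) (cur v : List Int) :
    pvInner e (d.insert e cur) v = d.insert e (pvStep cur v) := by
  unfold pvInner pvStep pvWeight
  rw [PySem.Dict.contains_insert_self]
  dsimp only
  rw [if_neg (by simp), PySem.Dict.getD_insert_self]
  split_ifs with hc
  · rw [PySem.Dict.insert_insert_self]
  · rfl

lemma inner_fold_insert (t : List (List Int)) (e : String) (d : PySem.Dict String (List Int))
    (cur : List Int) :
    t.foldl (pvInner e) (d.insert e cur) = d.insert e (t.foldl pvStep cur) := by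
  induction t generalizing cur with
  | nil => rfl
  | cons v t ih => rw [List.foldl_cons, pvInner_insert, List.foldl_cons]; exact ih (pvStep cur v)

lemma inner_fold_fresh (v : List Int) (t : List (List Int)) (e : String)
    (d : PySem.Dict String (List Int)) (h : d.contains e = false) :
    (v :: t).foldl (pvInner e) d = d.insert e (t.foldl pvStep v) := by
  have h1 : pvInner e d v = d.insert e v := by unfold pvInner; simp [h]
  rw [List.foldl_cons, h1, inner_fold_insert]

-- A's outer fold, on fresh distinct keys, appends the canonical per-key results
lemma outer_fold_A (s : List (String × List (List Int))) (d : PySem.Dict String (List Int))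
    (hnd : (s.map Prod.fst).Nodup) (hfresh : ∀ p ∈ s, d.contains p.1 = false) :
    (s.foldl (fun leaders p => p.2.foldl (pvInner p.1) leaders) d).items
      = d.items ++ pvCanon s := by
  induction s generalizing d with
  | nil => simp [pvCanon]
  | cons p s ih =>
    obtain ⟨e, vs⟩ := p
    simp only [List.map_cons, List.nodup_cons] at hnd
    have hde : d.contains e = false := hfresh (e, vs) (List.mem_cons_self ..)
    cases vs with
    | nil =>
      rw [List.foldl_cons]
      simp only [pvCanon, List.filterMap_cons]
      simpa [pvCanon] using
        ih d hnd.2 (fun q hq => hfresh q (List.mem_cons_of_mem _ hq))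
    | cons v t =>
      rw [List.foldl_cons]
      show (s.foldl _ ((v :: t).foldl (pvInner e) d)).items = _
      rw [inner_fold_fresh v t e d hde]
      have hfresh' : ∀ q ∈ s, ((d.insert e (t.foldl pvStep v)).contains q.1) = false := by
        intro q hq
        have hne : q.1 ≠ e := by
          intro hcontra
          exact hnd.1 (by simpa [hcontra] using List.mem_map_of_mem (f := Prod.fst) hq)
        rw [PySem.Dict.contains_insert]
        simp [hne, hfresh q (List.mem_cons_of_mem _ hq)]
      rw [ih _ hnd.2 hfresh']
      rw [PySem.Dict.items_insert_of_not_contains _ _ hde]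
      simp [pvCanon]

-- B's outer fold does the same
lemma outer_fold_B (s : List (String × List (List Int))) (d : PySem.Dict String (List Int))
    (hnd : (s.map Prod.fst).Nodup) (hfresh : ∀ p ∈ s, d.contains p.1 = false) :
    (s.foldl pvStepB d).items = d.items ++ pvCanon s := by
  induction s generalizing d with
  | nil => simp [pvCanon]
  | cons p s ih =>
    obtain ⟨e, vs⟩ := p
    simp only [List.map_cons, List.nodup_cons] at hnd
    have hde : d.contains e = false := hfresh (e, vs) (List.mem_cons_self ..)
    cases vs with
    | nil =>
      rw [List.foldl_cons]
      have hstep : pvStepB d (e, []) = d := by unfold pvStepB; simp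
      rw [hstep]
      simp only [pvCanon, List.filterMap_cons]
      simpa [pvCanon] using
        ih d hnd.2 (fun q hq => hfresh q (List.mem_cons_of_mem _ hq))
    | cons v t =>
      rw [List.foldl_cons, pvStepB_cons]
      have hfresh' : ∀ q ∈ s, ((d.insert e (t.foldl pvStep v)).contains q.1) = false := by
        intro q hq
        have hne : q.1 ≠ e := by
          intro hcontra
          exact hnd.1 (by simpa [hcontra] using List.mem_map_of_mem (f := Prod.fst) hq)
        rw [PySem.Dict.contains_insert]
        simp [hne, hfresh q (List.mem_cons_of_mem _ hq)]
      rw [ih _ hnd.2 hfresh']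
      rw [PySem.Dict.items_insert_of_not_contains _ _ hde]
      simp [pvCanon]

-- ===== VERDICT (by name: the statement is the Claim_ definition above) =====
theorem leaders_of_syndromes_spec : Claim_equal_leaders_of_syndromes := by
  intro s _ hpre
  unfold Pre_leaders_of_syndromes at hpre
  unfold Spec_leaders_of_syndromes leaders_of_syndromes leaders_of_syndromes_alt
  rw [outer_fold_A s _ hpre (fun p _ => rfl), outer_fold_B s _ hpre (fun p _ => rfl)]
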